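-- pv_equiv track=rewrite | github.com/davtoh/RRtools | tests/Ex_order_orderedDict.py | move_element
-- ===== SOURCE A (Python) =====
-- def move_element(odict, thekey, newpos):
--     odict[thekey] = odict.pop(thekey)
--     i = 0
--     for key, value in list(odict.items()):
--         if key != thekey and i >= newpos:
--             odict[key] = odict.pop(key)
--         i += 1
--     return odict
-- ===== SOURCE B (Python) =====
-- def move_element(odict, thekey, newpos):
--     # Compute the target ordering explicitly, then rebuild the dict in place.
--     val = odict.pop(thekey)
--     items = list(odict.items())
--     pos = newpos if newpos >= 0 else 0
--     items.insert(pos, (thekey, val))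
--     odict.clear()
--     odict.update(items)
--     return odict
-- ===== Notes on version B (the rewrite author's own statement) =====
-- stated objective: simpler
-- what changed: B computes the final ordering directly as a list (pop the key, insert it at the clamped position, rebuild the dict once) instead of A's counter-driven loop that selectively pops-and-reappends every entry at or past the position.
import Mathlib
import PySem

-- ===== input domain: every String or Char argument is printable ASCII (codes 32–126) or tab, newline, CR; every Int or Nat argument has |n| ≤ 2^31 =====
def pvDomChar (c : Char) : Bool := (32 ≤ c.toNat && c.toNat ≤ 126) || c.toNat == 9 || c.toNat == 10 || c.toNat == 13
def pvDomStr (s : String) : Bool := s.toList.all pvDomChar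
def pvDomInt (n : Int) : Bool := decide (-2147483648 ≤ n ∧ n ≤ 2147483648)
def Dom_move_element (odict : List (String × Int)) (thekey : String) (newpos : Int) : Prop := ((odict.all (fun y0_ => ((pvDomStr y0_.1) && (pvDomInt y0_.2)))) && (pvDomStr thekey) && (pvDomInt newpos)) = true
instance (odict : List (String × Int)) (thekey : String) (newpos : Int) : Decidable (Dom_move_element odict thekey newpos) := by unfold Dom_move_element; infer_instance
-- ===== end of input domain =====

-- B computes the final ordering directly as a list instead of A's counter-driven selective pop/reappend loop;
-- both Pythons mutate the dict in place to the same final state, the equivalence proved is about the return value.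

-- ===== PORT A =====
-- one loop step of A: `if key != thekey and i >= newpos: odict[key] = odict.pop(key)`, then `i += 1`
def stepA (thekey : String) (newpos : Int) (st : PySem.Dict String Int × Int) (kv : String × Int) :
    PySem.Dict String Int × Int :=
  if kv.1 ≠ thekey ∧ st.2 ≥ newpos then
    match st.1.pop? kv.1 with
    | some (v, d') => (d'.insert kv.1 v, st.2 + 1)
    | none => (st.1, st.2 + 1)   -- unreachable: key comes from the items snapshot
  else (st.1, st.2 + 1)

def move_element (odict : List (String × Int)) (thekey : String) (newpos : Int) : List (String × Int) :=
  match (PySem.Dict.ofList odict).pop? thekey with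
  | none => []   -- KeyError in Python; excluded by Pre_
  | some (val, d0) =>
    let d1 := d0.insert thekey val
    ((d1.items).foldl (stepA thekey newpos) (d1, 0)).1.items

-- ===== PORT B =====
def move_element_alt (odict : List (String × Int)) (thekey : String) (newpos : Int) : List (String × Int) :=
  match (PySem.Dict.ofList odict).pop? thekey with
  | none => []   -- KeyError in Python; excluded by Pre_
  | some (val, d0) =>
    let pos : Int := if newpos ≥ 0 then newpos else 0
    PySem.List.insert d0.items pos (thekey, val)

-- ===== PRECONDITION & SPEC =====
-- Pre_ excludes exactly the inputs where Python's odict.pop(thekey) raises KeyError (in A and in B alike).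
def Pre_move_element (odict : List (String × Int)) (thekey : String) (newpos : Int) : Prop :=
  thekey ∈ odict.map Prod.fst

instance (odict : List (String × Int)) (thekey : String) (newpos : Int) : Decidable (Pre_move_element odict thekey newpos) := by unfold Pre_move_element; infer_instance

def pvWitness_move_element : (List (String × Int)) × String × Int := ([("a", 1), ("b", 2), ("c", 3)], "a", 1)

def Spec_move_element (odict : List (String × Int)) (thekey : String) (newpos : Int) (out : List (String × Int)) : Prop := out = move_element_alt odict thekey newpos
instance (odict : List (String × Int)) (thekey : String) (newpos : Int) (out : List (String × Int)) : Decidable (Spec_move_element odict thekey newpos out) := by unfold Spec_move_element; infer_instance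

-- ===== CLAIM (what is proved, stated in full; the proofs are below) =====
def Claim_equal_move_element : Prop := ∀ (odict : List (String × Int)) (thekey : String) (newpos : Int), Dom_move_element odict thekey newpos → Pre_move_element odict thekey newpos → Spec_move_element odict thekey newpos (move_element odict thekey newpos)


-- ===== LEMMAS AND PROOFS =====

-- Python's `d.pop(k)` when the items list splits as pre ++ (k,v) :: post with k in neither side
theorem pop_split {ν : Type} (pre post : List (String × ν)) (k : String) (v : ν)
    (hpre : k ∉ pre.map Prod.fst) (hpost : k ∉ post.map Prod.fst) :
    (PySem.Dict.mk (pre ++ (k, v) :: post)).pop? k = some (v, PySem.Dict.mk (pre ++ post)) := by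
  have hfind : ∀ l : List (String × ν), k ∉ l.map Prod.fst →
      List.find? (fun p => p.1 == k) l = none := by
    intro l hl
    apply List.find?_eq_none.mpr
    intro p hp
    exact fun h => hl (List.mem_map.mpr ⟨p, hp, eq_of_beq h⟩)
  have hfilter : ∀ l : List (String × ν), k ∉ l.map Prod.fst →
      List.filter (fun p => !p.1 == k) l = l := by
    intro l hl
    apply List.filter_eq_self.mpr
    intro p hp
    simp only [Bool.not_eq_eq_eq_not, Bool.not_true]
    exact beq_eq_false_iff_ne.mpr (fun h => hl (List.mem_map.mpr ⟨p, hp, h⟩))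
  simp [PySem.Dict.pop?, PySem.Dict.get?, PySem.Dict.erase,
    List.find?_append, hfind pre hpre, List.find?_cons,
    List.filter_append, hfilter pre hpre, List.filter_cons, hfilter post hpost]

-- the loop invariant: processing the snapshot suffix ys ++ [t] with counter j
theorem loopA_inv (thekey : String) (newpos : Int) (t : String × Int) (ht : t.1 = thekey) :
    ∀ (ys front moved : List (String × Int)) (j : Int),
    ((front ++ ys ++ t :: moved).map Prod.fst).Nodup →
    thekey ∉ ys.map Prod.fst →
    ((ys ++ [t]).foldl (stepA thekey newpos) (PySem.Dict.mk (front ++ ys ++ t :: moved), j)).1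
      = PySem.Dict.mk (front ++ ys.take (newpos - j).toNat ++ t :: (moved ++ ys.drop (newpos - j).toNat)) := by
  intro ys
  induction ys with
  | nil =>
    intro front moved j _ _
    simp [stepA, ht]
  | cons kv ys ih =>
    intro front moved j hnd hkey
    obtain ⟨k, v⟩ := kv
    have hk : k ≠ thekey := by
      intro h; exact hkey (by simp [h])
    have hkey' : thekey ∉ ys.map Prod.fst := by
      intro h; exact hkey (by simp [h])
    -- split the key-nodup hypothesis around the head entry
    have hsplit : front ++ ((k, v) :: ys) ++ t :: moved = front ++ (k, v) :: (ys ++ t :: moved) := by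
      simp
    rw [hsplit] at hnd ⊢
    have hnd' := hnd
    rw [List.map_append, List.map_cons] at hnd'
    rcases List.nodup_append.mp hnd' with ⟨hndf, hnd2, hdisj⟩
    have hkpre : k ∉ front.map Prod.fst := by
      intro h
      exact hdisj k h k (by simp) rfl
    have hkpost : k ∉ (ys ++ t :: moved).map Prod.fst :=
      (List.nodup_cons.mp hnd2).1
    by_cases hj : j ≥ newpos
    · -- the entry is moved to the end
      have hpop := pop_split front (ys ++ t :: moved) k v hkpre hkpost
      have hc : (PySem.Dict.mk (front ++ (ys ++ t :: moved))).contains k = false := by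
        simp only [PySem.Dict.contains, List.any_eq_false]
        intro p hp
        refine fun h => ?_
        rcases List.mem_append.mp hp with hp' | hp'
        · exact hkpre (List.mem_map.mpr ⟨p, hp', eq_of_beq h⟩)
        · exact hkpost (List.mem_map.mpr ⟨p, hp', eq_of_beq h⟩)
      have hstep : stepA thekey newpos (PySem.Dict.mk (front ++ (k, v) :: (ys ++ t :: moved)), j) (k, v)
          = (PySem.Dict.mk (front ++ ys ++ t :: (moved ++ [(k, v)])), j + 1) := by
        simp only [stepA, hk, ne_eq, not_false_eq_true, hj, and_self, if_true, hpop]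
        simp only [PySem.Dict.insert, hc, Bool.false_eq_true, if_false]
        simp [PySem.Dict.items]
      rw [List.cons_append, List.foldl_cons, hstep]
      have hperm : ((front ++ ys ++ t :: (moved ++ [(k, v)])).map Prod.fst).Nodup := by
        have : (front ++ ys ++ t :: (moved ++ [(k, v)])).Perm (front ++ (k, v) :: (ys ++ t :: moved)) := by
          refine List.perm_iff_count.mpr (fun a => ?_)
          simp [List.count_append, List.count_cons]
          ring
        exact ((this.map Prod.fst).nodup_iff).mpr hnd
      rw [ih front (moved ++ [(k, v)]) (j + 1) hperm hkey']
      have h0 : (newpos - j).toNat = 0 := by omega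
      have h1 : (newpos - (j + 1)).toNat = 0 := by omega
      simp [h0, h1]
    · -- the entry stays in place
      have hstep : stepA thekey newpos (PySem.Dict.mk (front ++ (k, v) :: (ys ++ t :: moved)), j) (k, v)
          = (PySem.Dict.mk (front ++ (k, v) :: (ys ++ t :: moved)), j + 1) := by
        simp only [stepA, ne_eq, ge_iff_le]
        rw [if_neg]
        simp only [not_and]
        intro _
        omega
      rw [List.cons_append, List.foldl_cons, hstep]
      have hre : front ++ (k, v) :: (ys ++ t :: moved) = (front ++ [(k, v)]) ++ ys ++ t :: moved := by
        simp
      rw [hre, ih (front ++ [(k, v)]) moved (j + 1) (by rw [← hre]; exact hnd) hkey']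
      have hc : (newpos - j).toNat = (newpos - (j + 1)).toNat + 1 := by omega
      rw [hc]
      simp [List.take_succ_cons, List.drop_succ_cons]

-- membership in the original pair list survives dict construction
theorem contains_ofList_of_mem (l : List (String × Int)) (k : String)
    (h : k ∈ l.map Prod.fst) : (PySem.Dict.ofList l).contains k = true := by
  have step : ∀ (l : List (String × Int)) (d : PySem.Dict String Int),
      (d.contains k = true ∨ k ∈ l.map Prod.fst) →
      (l.foldl (fun acc p => acc.insert p.1 p.2) d).contains k = true := by
    intro l
    induction l with
    | nil => intro d h; simpa using h
    | cons p l ih =>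
      intro d h
      rw [List.foldl_cons]
      apply ih
      by_cases hpk : k = p.1
      · left; rw [hpk]; exact PySem.Dict.contains_insert_self d p.1 p.2
      · rcases h with h | h
        · left; rw [PySem.Dict.contains_insert]; simp [h]
        · simp only [List.map_cons, List.mem_cons] at h
          rcases h with h | h
          · exact absurd h hpk
          · right; exact h
  exact step l PySem.Dict.empty (Or.inr h)

-- ===== VERDICT (by name: the statement is the Claim_ definition above) =====
theorem move_element_spec : Claim_equal_move_element := by
  intro odict thekey newpos _ hpre
  unfold Spec_move_element move_element move_element_alt
  have hcont := contains_ofList_of_mem odict thekey hpre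
  set d := PySem.Dict.ofList odict with hd
  have hget : ∃ val, d.get? thekey = some val := by
    rw [PySem.Dict.contains_eq_isSome_get?] at hcont
    rcases Option.isSome_iff_exists.mp hcont with ⟨v, hv⟩
    exact ⟨v, hv⟩
  obtain ⟨val, hval⟩ := hget
  have hpop : d.pop? thekey = some (val, d.erase thekey) := by
    simp [PySem.Dict.pop?, hval]
  rw [hpop]
  dsimp only
  set xs := (d.erase thekey).items with hxs
  -- key facts about xs
  have hndd : d.keys.Nodup := PySem.Dict.nodup_keys_ofList odict
  have hnd : (xs.map Prod.fst).Nodup := by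
    have hndd' : (d.items.map Prod.fst).Nodup := hndd
    have hsub : List.Sublist (xs.map Prod.fst) (d.items.map Prod.fst) :=
      List.Sublist.map Prod.fst List.filter_sublist
    exact List.Nodup.sublist hsub hndd'
  have hnk : thekey ∉ xs.map Prod.fst := by
    intro hmem
    rcases List.mem_map.mp hmem with ⟨q, hq, hqk⟩
    have hq' : q ∈ List.filter (fun p => !p.1 == thekey) d.items := hq
    rcases List.mem_filter.mp hq' with ⟨_, hpr⟩
    rw [hqk] at hpr
    simp at hpr
  have hcontE : (d.erase thekey).contains thekey = false := by
    simp only [PySem.Dict.contains, List.any_eq_false]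
    intro p hp
    exact fun h => hnk (List.mem_map.mpr ⟨p, hp, eq_of_beq h⟩)
  have hins : (d.erase thekey).insert thekey val = PySem.Dict.mk (xs ++ [(thekey, val)]) := by
    simp only [PySem.Dict.insert, hcontE, Bool.false_eq_true, if_false]
    rfl
  rw [hins]
  have hmain := loopA_inv thekey newpos (thekey, val) rfl xs [] [] 0
    (by simpa using hnd.append (by simp) (by simpa using hnk)) hnk
  simp only [List.nil_append, List.append_nil] at hmain
  have hitems : (PySem.Dict.mk (xs ++ [(thekey, val)])).items = xs ++ [(thekey, val)] := rfl
  rw [hitems, hmain]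
  -- now compare the two explicit lists
  simp only [PySem.Dict.items, Int.sub_zero, PySem.List.insert, PySem.List.sliceIndices]
  norm_num
  by_cases hnp : newpos ≥ 0
  · simp only [hnp, if_true]
    by_cases hlen : newpos ≤ (xs.length : Int)
    · have : (min newpos (xs.length : Int)).toNat = newpos.toNat := by omega
      rw [if_neg (by omega), this]
    · have h1 : (min newpos (xs.length : Int)).toNat = xs.length := by omega
      have h2 : xs.length ≤ newpos.toNat := by omega
      rw [if_neg (by omega), h1]
      rw [List.take_of_length_le h2, List.take_of_length_le (le_refl _),
        List.drop_of_length_le h2, List.drop_of_length_le (le_refl _)]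
  · have h0 : newpos.toNat = 0 := by omega
    simp only [hnp, if_false]
    rw [if_neg (by omega)]
    simp [h0]
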